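-- pv_equiv track=rewrite | github.com/PhilWicke/AoC22 | Day_08/p1.py | look
-- ===== SOURCE A (Python) =====
-- def look(heights, marks, side="l"):
--     for idx, height in enumerate(heights):
--         top_idx_l = height.index(max(height))
--         top_idx_r = "".join([str(h) for h in height]).rindex(str(max(height)))
--
--         if idx==0 or idx == len(heights)-1:
--             pass
--         elif side=="l":
--             marks[idx][top_idx_l] = 1
--             for i,h in enumerate(height[:top_idx_l]):
--                 if [x for x in height[:i] if x >= h]:
--                     marks[idx][i] = 0
--         elif side == "r":
--             marks[idx][top_idx_r]= 1
--             rev_trunc_list = list(reversed(height))[:len(height)-1-top_idx_r]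
--             rev_trunc_enum = list(reversed(list(enumerate(height))))[:len(height)-1-top_idx_r]
--             c = 0
--             for i,h in rev_trunc_enum:
--                 if [x for x in rev_trunc_list[:c] if x >= h]:
--                     marks[idx][i] = 0
--                 c+=1
--             hidden_no = len(height[top_idx_l+1:top_idx_r])
--             if hidden_no > 0: marks[idx][top_idx_l+1:top_idx_r] = hidden_no*[0]
--
--     return marks
--
-- heights = []  # height of trees
-- ===== SOURCE B (Python) =====
-- # B: one linear sweep per row with a running maximum instead of A's per-index
-- # rescans of the whole prefix/suffix and its join/str/rindex machinery; like A,
-- # mutates `marks` in place and returns it.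
--
-- def _mark_from_left(row, mrow):
--     m = max(row)
--     L = row.index(m)
--     best = None
--     for i in range(L):
--         h = row[i]
--         if best is not None and best >= h:
--             mrow[i] = 0
--         if best is None or h > best:
--             best = h
--     mrow[L] = 1
--
--
-- def _mark_from_right(row, mrow):
--     m = max(row)
--     L = row.index(m)
--     R = len(row) - 1 - row[::-1].index(m)
--     mrow[R] = 1
--     best = None
--     for i in range(len(row) - 1, R, -1):
--         h = row[i]
--         if best is not None and best >= h:
--             mrow[i] = 0
--         if best is None or h > best:
--             best = h
--     if L + 1 < R:
--         mrow[L + 1:R] = [0] * (R - L - 1)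
--
--
-- def look(heights, marks, side="l"):
--     for idx in range(1, len(heights) - 1):
--         if side == "l":
--             _mark_from_left(heights[idx], marks[idx])
--         elif side == "r":
--             _mark_from_right(heights[idx], marks[idx])
--     return marks
-- ===== Notes on version B (the rewrite author's own statement) =====
-- stated objective: faster
-- what changed: Each row is handled by one linear sweep carrying a running maximum (and the hidden middle written by a single slice assignment), instead of A's per-index rescan of the whole prefix/suffix and its str/join/rindex machinery for locating the rightmost maximum.
-- outside the precondition, e.g. on look([[1], [2, 1], [9]], [[0], [7], [0]], 'l'): A returns [[0], [1], [0]], B returns [[0], [1], [0]]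
import Mathlib
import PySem

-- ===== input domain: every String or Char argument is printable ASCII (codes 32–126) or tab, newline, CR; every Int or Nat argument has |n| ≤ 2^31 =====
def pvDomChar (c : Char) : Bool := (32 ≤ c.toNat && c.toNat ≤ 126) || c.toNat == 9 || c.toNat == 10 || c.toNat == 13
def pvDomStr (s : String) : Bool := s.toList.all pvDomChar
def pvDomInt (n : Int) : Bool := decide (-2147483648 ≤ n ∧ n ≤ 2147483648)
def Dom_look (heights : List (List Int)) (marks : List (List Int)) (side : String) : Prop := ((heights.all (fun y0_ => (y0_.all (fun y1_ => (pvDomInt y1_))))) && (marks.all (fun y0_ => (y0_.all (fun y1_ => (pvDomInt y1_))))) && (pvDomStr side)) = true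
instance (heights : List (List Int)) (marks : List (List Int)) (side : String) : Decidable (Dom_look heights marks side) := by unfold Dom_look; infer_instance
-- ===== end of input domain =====

-- B replaces A's per-index rescans of the whole prefix/suffix (and A's join/str/rindex
-- machinery) by one sweep per row carrying a running maximum; both Pythons mutate
-- `marks` in place and return it — the theorems below are about the return value.

-- ===== PORT A =====
-- max(l)  (Python raises ValueError on []; such inputs are outside Pre_)
def pyMaxI (l : List Int) : Int := (PySem.List.max? l (fun x => x)).getD 0
-- l.index(v)  (Python raises ValueError if absent; here always called with v ∈ l)
def pyIndexNat (l : List Int) (v : Int) : Nat := (PySem.List.index? l v).getD 0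
-- marks[i][j] = v  (functional; Python raises IndexError out of range — outside Pre_)
def pvSet2 (mk : List (List Int)) (i j : Nat) (v : Int) : List (List Int) :=
  mk.set i ((mk.getD i []).set j v)

def look (heights : List (List Int)) (marks : List (List Int)) (side : String) : List (List Int) :=
  (PySem.List.enumerate heights).foldl (fun mk p =>
    let height := p.2
    let m := pyMaxI height
    let topL := pyIndexNat height m
    -- "".join([str(h) for h in height]).rindex(str(max(height))); the pattern always
    -- occurs as a substring, so rindex = rfind (≥ 0) and .toNat is exact
    let topR := (PySem.Chars.rfind (PySem.Chars.join [] (height.map PySem.Int.toChars))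
                  (PySem.Int.toChars m)).toNat
    if p.1 = 0 ∨ p.1 = PySem.List.len heights - 1 then mk
    else if side = "l" then
      (PySem.List.enumerate (height.take topL)).foldl (fun mk' q =>
          if (height.take q.1.toNat).filter (fun x => decide (q.2 ≤ x)) ≠ [] then
            pvSet2 mk' p.1.toNat q.1.toNat 0
          else mk')
        (pvSet2 mk p.1.toNat topL 1)
    else if side = "r" then
      let mk1 := pvSet2 mk p.1.toNat topR 1
      let rtl := PySem.List.slice height.reverse none (some ((height.length : Int) - 1 - topR))
      let rte := PySem.List.slice (PySem.List.enumerate height).reverse none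
                   (some ((height.length : Int) - 1 - topR))
      let mk2 := (rte.foldl (fun st q =>
          (if (rtl.take st.2).filter (fun x => decide (q.2 ≤ x)) ≠ [] then
             pvSet2 st.1 p.1.toNat q.1.toNat 0
           else st.1, st.2 + 1)) (mk1, (0 : Nat))).1
      let hidden := (PySem.List.slice height (some ((topL : Int) + 1)) (some (topR : Int))).length
      if 0 < hidden then
        -- marks[idx][topL+1:topR] = hidden*[0] with 0 ≤ topL+1 < topR: exact as take/replicate/drop
        mk2.set p.1.toNat ((mk2.getD p.1.toNat []).take (topL + 1) ++ List.replicate hidden 0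
          ++ (mk2.getD p.1.toNat []).drop topR)
      else mk2
    else mk) marks

-- ===== PORT B =====
-- `best = h if best is None or h > best else best`
def pvBestStep (best : Option Int) (h : Int) : Option Int :=
  match best with
  | none => some h
  | some b => if b < h then some h else some b

-- one iteration of B's visibility sweep: hide row[i] if the running maximum already ≥ it
def pvVisStep (row : List Int) (st : List Int × Option Int) (i : Int) : List Int × Option Int :=
  let h := PySem.List.pyGetD row i 0
  ((match st.2 with
    | some b => if h ≤ b then st.1.set i.toNat 0 else st.1
    | none => st.1), pvBestStep st.2 h)

def markFromLeft (row : List Int) (mrow : List Int) : List Int :=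
  let m := pyMaxI row
  let L := pyIndexNat row m
  (((PySem.List.pyRange 0 (L : Int) 1).foldl (pvVisStep row) (mrow, none)).1).set L 1

def markFromRight (row : List Int) (mrow : List Int) : List Int :=
  let m := pyMaxI row
  let L := pyIndexNat row m
  -- len(row) - 1 - row[::-1].index(m)
  let R := row.length - 1 - pyIndexNat row.reverse m
  let st := (PySem.List.pyRange ((row.length : Int) - 1) (R : Int) (-1)).foldl
              (pvVisStep row) (mrow.set R 1, none)
  if L + 1 < R then
    -- mrow[L+1:R] = [0]*(R-L-1), exact as take/replicate/drop (0 ≤ L+1 < R)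
    st.1.take (L + 1) ++ List.replicate (R - L - 1) 0 ++ st.1.drop R
  else st.1

def look_alt (heights : List (List Int)) (marks : List (List Int)) (side : String) : List (List Int) :=
  (PySem.List.pyRange 1 (PySem.List.len heights - 1) 1).foldl (fun mk i =>
    if side = "l" then
      mk.set i.toNat (markFromLeft (heights.getD i.toNat []) (mk.getD i.toNat []))
    else if side = "r" then
      mk.set i.toNat (markFromRight (heights.getD i.toNat []) (mk.getD i.toNat []))
    else mk) marks

-- ===== PRECONDITION & SPEC =====
-- Pre_ excludes exactly the inputs on which A does not return a matchable ordinary value: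
-- (i) inputs with an empty height row (max() raises ValueError); (ii) for side "l"/"r",
-- marks rows shorter than their interior height row (A's in-place writes can raise
-- IndexError there); (iii) side "r" with an interior height outside 0..9, where A's
-- rindex over the digit concatenation yields a STRING offset, not a list index — there
-- A usually raises IndexError and, when it happens to return, the marked position is an
-- accident of the string encoding; B marks the rightmost maximum instead.
def Pre_look (heights : List (List Int)) (marks : List (List Int)) (side : String) : Prop :=
  (∀ row ∈ heights, row ≠ []) ∧
  ((side = "l" ∨ side = "r") → 3 ≤ heights.length →
      heights.length - 1 ≤ marks.length ∧
      (∀ j : Nat, j < heights.length → 1 ≤ j → j + 1 < heights.length →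
        (heights.getD j []).length ≤ (marks.getD j []).length)) ∧
  (side = "r" → ∀ j : Nat, j < heights.length → 1 ≤ j → j + 1 < heights.length →
      ∀ x ∈ heights.getD j [], 0 ≤ x ∧ x ≤ 9)
instance (heights : List (List Int)) (marks : List (List Int)) (side : String) :
    Decidable (Pre_look heights marks side) := by
  unfold Pre_look
  haveI d1 : Decidable (∀ row ∈ heights, row ≠ []) := by infer_instance
  haveI d2 : Decidable (∀ j : Nat, j < heights.length → 1 ≤ j → j + 1 < heights.length →
      (heights.getD j []).length ≤ (marks.getD j []).length) := by infer_instance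
  haveI d3 : Decidable (∀ j : Nat, j < heights.length → 1 ≤ j → j + 1 < heights.length →
      ∀ x ∈ heights.getD j [], 0 ≤ x ∧ x ≤ 9) := by infer_instance
  infer_instance

def pvWitness_look : List (List Int) × List (List Int) × String :=
  ([[3], [1, 2], [4]], [[0], [0, 0], [0]], "l")

def Spec_look (heights : List (List Int)) (marks : List (List Int)) (side : String) (out : List (List Int)) : Prop := out = look_alt heights marks side
instance (heights : List (List Int)) (marks : List (List Int)) (side : String) (out : List (List Int)) : Decidable (Spec_look heights marks side out) := by unfold Spec_look; infer_instance

-- ===== CLAIM (what is proved, stated in full; the proofs are below) =====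
def Claim_equal_look : Prop := ∀ (heights : List (List Int)) (marks : List (List Int)) (side : String), Dom_look heights marks side → Pre_look heights marks side → Spec_look heights marks side (look heights marks side)

-- ===== LEMMAS AND PROOFS =====

-- A's "l"-branch and "r"-branch, expressed as transforms of the single marks row they touch
def rowA_l (row : List Int) (mrow : List Int) : List Int :=
  (PySem.List.enumerate (row.take (pyIndexNat row (pyMaxI row)))).foldl (fun mr q =>
      if (row.take q.1.toNat).filter (fun x => decide (q.2 ≤ x)) ≠ [] then mr.set q.1.toNat 0
      else mr)
    (mrow.set (pyIndexNat row (pyMaxI row)) 1)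

def rowA_r (row : List Int) (mrow : List Int) : List Int :=
  let m := pyMaxI row
  let topL := pyIndexNat row m
  let topR := (PySem.Chars.rfind (PySem.Chars.join [] (row.map PySem.Int.toChars))
                (PySem.Int.toChars m)).toNat
  let rtl := PySem.List.slice row.reverse none (some ((row.length : Int) - 1 - topR))
  let rte := PySem.List.slice (PySem.List.enumerate row).reverse none
               (some ((row.length : Int) - 1 - topR))
  let mr2 := (rte.foldl (fun st q =>
      (if (rtl.take st.2).filter (fun x => decide (q.2 ≤ x)) ≠ [] then st.1.set q.1.toNat 0
       else st.1, st.2 + 1)) (mrow.set topR 1, (0 : Nat))).1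
  let hidden := (PySem.List.slice row (some ((topL : Int) + 1)) (some (topR : Int))).length
  if 0 < hidden then
    mr2.take (topL + 1) ++ List.replicate hidden 0 ++ mr2.drop topR
  else mr2

def pvApply (heights : List (List Int)) (G : List Int → List Int → List Int)
    (marks : List (List Int)) : List (List Int) :=
  marks.mapIdx (fun j r => if 1 ≤ j ∧ j + 1 < heights.length then G (heights.getD j []) r else r)

def pvBestOf (l : List Int) : Option Int := l.foldl pvBestStep none

-- running maximum facts
lemma foldl_bestStep_some (l : List Int) (b : Int) :
    ∃ c, l.foldl pvBestStep (some b) = some c ∧ b ≤ c ∧ (c = b ∨ c ∈ l) ∧ ∀ x ∈ l, x ≤ c := by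
  induction l generalizing b with
  | nil => exact ⟨b, rfl, le_refl _, Or.inl rfl, by simp⟩
  | cons h t ih =>
    have hstep : pvBestStep (some b) h = some (if b < h then h else b) := by
      show (if b < h then some h else some b) = _
      split <;> rfl
    rcases ih (if b < h then h else b) with ⟨c, hc, hbc, hmem, hmax⟩
    refine ⟨c, ?_, ?_, ?_, ?_⟩
    · rw [List.foldl_cons, hstep]; exact hc
    · split at hbc <;> omega
    · rcases hmem with h1 | h1
      · by_cases hbh : b < h
        · rw [if_pos hbh] at h1; exact Or.inr (by simp [h1])
        · rw [if_neg hbh] at h1; exact Or.inl h1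
      · exact Or.inr (List.mem_cons_of_mem _ h1)
    · intro x hx
      rcases List.mem_cons.mp hx with rfl | hx
      · split at hbc <;> omega
      · exact hmax x hx

lemma pvBestOf_spec (l : List Int) (hne : l ≠ []) :
    ∃ c, pvBestOf l = some c ∧ c ∈ l ∧ ∀ x ∈ l, x ≤ c := by
  rcases l with _ | ⟨h, t⟩
  · exact absurd rfl hne
  · rcases foldl_bestStep_some t h with ⟨c, hc, hbc, hmem, hmax⟩
    refine ⟨c, hc, ?_, ?_⟩
    · rcases hmem with rfl | h1
      · exact List.mem_cons_self
      · exact List.mem_cons_of_mem _ h1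
    · intro x hx
      rcases List.mem_cons.mp hx with rfl | hx
      · exact hbc
      · exact hmax x hx

lemma pvBestOf_append_singleton (l : List Int) (h : Int) :
    pvBestOf (l ++ [h]) = pvBestStep (pvBestOf l) h := by
  simp [pvBestOf, List.foldl_append]

-- A's "is some earlier tree at least as tall" test, as a fact about the running maximum
lemma cond_iff_bestOf (l : List Int) (h : Int) :
    (l.filter (fun x => decide (h ≤ x)) ≠ []) ↔ (∃ b, pvBestOf l = some b ∧ h ≤ b) := by
  constructor
  · intro hf
    have hex : ∃ x ∈ l, h ≤ x := by
      by_contra hcon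
      refine hf (List.filter_eq_nil_iff.mpr ?_)
      intro a ha
      simp only [decide_eq_true_eq]
      intro hha
      exact hcon ⟨a, ha, hha⟩
    rcases hex with ⟨x, hx, hhx⟩
    rcases pvBestOf_spec l (by rintro rfl; simp at hx) with ⟨c, hc, _, hmax⟩
    exact ⟨c, hc, le_trans hhx (hmax x hx)⟩
  · rintro ⟨b, hb, hhb⟩
    have hne : l ≠ [] := by rintro rfl; simp [pvBestOf] at hb
    rcases pvBestOf_spec l hne with ⟨c, hc, hmem, _⟩
    rw [hb] at hc
    obtain rfl : b = c := by injection hc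
    intro hnil
    have := List.filter_eq_nil_iff.mp hnil b hmem
    simp [hhb] at this

-- index / max facts
lemma pyMaxI_mem (row : List Int) (hne : row ≠ []) : pyMaxI row ∈ row := by
  rcases h : PySem.List.max? row (fun x => x) with _ | m
  · exact absurd ((PySem.List.max?_eq_none_iff row _).mp h) hne
  · have := PySem.List.max?_mem h
    simpa [pyMaxI, h] using this

lemma pyIndexNat_spec (row : List Int) (v : Int) (hv : v ∈ row) :
    ∃ h : pyIndexNat row v < row.length,
      row[pyIndexNat row v]'h = v ∧
      ∀ j (hj : j < row.length), j < pyIndexNat row v → row[j]'hj ≠ v := by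
  rcases h : PySem.List.index? row v with _ | k
  · exact absurd ((PySem.List.index?_eq_none_iff row v).mp h) (by simpa using hv)
  · have hL : pyIndexNat row v = k := by unfold pyIndexNat; rw [h]; rfl
    rcases PySem.List.getElem_of_index?_eq_some h with ⟨hk, hkv, hmin⟩
    rw [hL]
    exact ⟨hk, hkv, fun j hj hjk => hmin j hjk⟩

lemma pyIndexNat_le (row : List Int) (v : Int) : pyIndexNat row v ≤ row.length := by
  rcases h : PySem.List.index? row v with _ | k
  · unfold pyIndexNat; rw [h]; exact Nat.zero_le _
  · have hL : pyIndexNat row v = k := by unfold pyIndexNat; rw [h]; rfl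
    rcases PySem.List.getElem_of_index?_eq_some h with ⟨hk, _, _⟩
    rw [hL]; exact Nat.le_of_lt hk

lemma lastIdx_spec (row : List Int) (m : Int) (hm : m ∈ row) :
    ∃ h : row.length - 1 - pyIndexNat row.reverse m < row.length,
      row[row.length - 1 - pyIndexNat row.reverse m]'h = m ∧
      ∀ i (hi : i < row.length), row.length - 1 - pyIndexNat row.reverse m < i →
        row[i]'hi ≠ m := by
  have hmr : m ∈ row.reverse := List.mem_reverse.mpr hm
  rcases pyIndexNat_spec row.reverse m hmr with ⟨hk, hkv, hkmin⟩
  have hklen : pyIndexNat row.reverse m < row.length := by simpa using hk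
  have hpos : 0 < row.length := List.length_pos_of_mem hm
  refine ⟨by omega, ?_, ?_⟩
  · rw [List.getElem_reverse] at hkv
    exact hkv
  · intro i hi hlt
    have hjk : row.length - 1 - i < pyIndexNat row.reverse m := by omega
    have hj : row.length - 1 - i < row.reverse.length := by
      simpa using (by omega : row.length - 1 - i < row.length)
    have hne := hkmin (row.length - 1 - i) hj hjk
    rw [List.getElem_reverse] at hne
    have hidx : row.length - 1 - (row.length - 1 - i) = i := by omega
    simp only [hidx] at hne
    exact hne

-- ===== the "l" row lemma =====

lemma loopL (row : List Int) :
    ∀ (k : Nat), k ≤ row.length → ∀ (mr : List Int),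
    ((PySem.List.enumerate (row.take k)).foldl (fun mr' q =>
        if (row.take q.1.toNat).filter (fun x => decide (q.2 ≤ x)) ≠ [] then mr'.set q.1.toNat 0
        else mr') mr
      = ((PySem.List.pyRange 0 (k : Int) 1).foldl (pvVisStep row) (mr, none)).1)
    ∧ ((PySem.List.pyRange 0 (k : Int) 1).foldl (pvVisStep row) (mr, none)).2
        = pvBestOf (row.take k) := by
  intro k
  induction k with
  | zero =>
    intro _ mr
    have hnil : PySem.List.pyRange 0 ((0 : Nat) : Int) 1 = [] := by
      norm_num [PySem.List.pyRange_one_eq_nil]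
    refine ⟨?_, ?_⟩ <;> rw [List.take_zero, hnil] <;> rfl
  | succ k ih =>
    intro hk mr
    have hkl : k < row.length := hk
    have htake : row.take (k + 1) = row.take k ++ [row[k]] := by
      rw [List.take_add_one, List.getElem?_eq_getElem hkl]; rfl
    have hrange : PySem.List.pyRange 0 ((k : Int) + 1) 1
        = PySem.List.pyRange 0 (k : Int) 1 ++ [(k : Int)] :=
      PySem.List.pyRange_one_succ_right (by omega)
    have hcast : ((k + 1 : Nat) : Int) = (k : Int) + 1 := by push_cast; ring
    have hlen : (row.take k).length = k := by simp [List.length_take]; omega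
    have hpair : ((PySem.List.pyRange 0 (k : Int) 1).foldl (pvVisStep row) (mr, none))
        = (((PySem.List.pyRange 0 (k : Int) 1).foldl (pvVisStep row) (mr, none)).1,
           pvBestOf (row.take k)) := by
      rw [← (ih (by omega) mr).2]
    have hsingle : PySem.List.enumerate [row[k]] ((0 : Int) + ((row.take k).length : Int))
        = [((k : Int), row[k])] := by
      rw [PySem.List.enumerate_cons, PySem.List.enumerate_nil, hlen]
      norm_num
    have hget : PySem.List.pyGetD row (k : Int) 0 = row[k] := by
      rw [PySem.List.pyGetD_natCast, List.getD_eq_getElem _ _ hkl]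
    constructor
    · rw [htake, PySem.List.enumerate_append, List.foldl_append, hsingle, hcast, hrange,
        List.foldl_append]
      simp only [List.foldl_cons, List.foldl_nil]
      rw [hpair, (ih (by omega) mr).1]
      simp only [Int.toNat_natCast]
      rcases hb : pvBestOf (row.take k) with _ | b
      · have hcnd : ¬ ((row.take k).filter (fun x => decide (row[k] ≤ x)) ≠ []) := by
          rw [cond_iff_bestOf]
          rintro ⟨b, hb', _⟩; rw [hb] at hb'; simp at hb'
        rw [if_neg hcnd]
        simp [pvVisStep]
      · by_cases hle : row[k] ≤ b
        · have hcnd : (row.take k).filter (fun x => decide (row[k] ≤ x)) ≠ [] :=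
            (cond_iff_bestOf _ _).mpr ⟨b, hb, hle⟩
          rw [if_pos hcnd]
          simp [pvVisStep, hget, hle]
        · have hcnd : ¬ ((row.take k).filter (fun x => decide (row[k] ≤ x)) ≠ []) := by
            rw [cond_iff_bestOf]
            rintro ⟨b', hb', hle'⟩; rw [hb] at hb'
            obtain rfl : b = b' := by injection hb'
            exact hle hle'
          rw [if_neg hcnd]
          simp [pvVisStep, hget, hle]
    · rw [hcast, hrange, List.foldl_append]
      simp only [List.foldl_cons, List.foldl_nil]
      rw [hpair, htake, pvBestOf_append_singleton]
      simp [pvVisStep, hget]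

lemma foldl_set_out (l : List (Int × Int)) (row : List Int) (L : Nat)
    (hl : ∀ q ∈ l, q.1.toNat ≠ L) (mr : List Int) (v : Int) :
    l.foldl (fun mr' q =>
        if (row.take q.1.toNat).filter (fun x => decide (q.2 ≤ x)) ≠ [] then mr'.set q.1.toNat 0
        else mr') (mr.set L v)
    = (l.foldl (fun mr' q =>
        if (row.take q.1.toNat).filter (fun x => decide (q.2 ≤ x)) ≠ [] then mr'.set q.1.toNat 0
        else mr') mr).set L v := by
  induction l generalizing mr with
  | nil => rfl
  | cons q t ih =>
    have hq : q.1.toNat ≠ L := hl q (List.mem_cons_self)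
    have ht : ∀ p ∈ t, p.1.toNat ≠ L := fun p hp => hl p (List.mem_cons_of_mem _ hp)
    simp only [List.foldl_cons]
    split
    · rw [List.set_comm _ _ hq.symm, ih ht]
    · exact ih ht _

lemma rowL_eq (row mrow : List Int) : rowA_l row mrow = markFromLeft row mrow := by
  have hL : pyIndexNat row (pyMaxI row) ≤ row.length := pyIndexNat_le row _
  have hidx : ∀ q ∈ PySem.List.enumerate (row.take (pyIndexNat row (pyMaxI row))),
      q.1.toNat ≠ pyIndexNat row (pyMaxI row) := by
    intro q hq
    rw [PySem.List.mem_enumerate_iff] at hq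
    rcases hq with ⟨k', hk', rfl⟩
    have hk'' : k' < pyIndexNat row (pyMaxI row) := by
      rw [List.length_take] at hk'; omega
    simp only [zero_add, Int.toNat_natCast]
    omega
  unfold rowA_l markFromLeft
  rw [foldl_set_out _ row _ hidx mrow 1, (loopL row (pyIndexNat row (pyMaxI row)) hL mrow).1]

-- ===== the "r" row lemma =====

lemma toChars_digit (x : Int) (h0 : 0 ≤ x) (h9 : x ≤ 9) :
    PySem.Int.toChars x = [Char.ofNat (48 + x.toNat)] := by
  interval_cases x <;> rfl

lemma dchar_inj (x y : Int) (hx0 : 0 ≤ x) (hx9 : x ≤ 9) (hy0 : 0 ≤ y) (hy9 : y ≤ 9)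
    (h : Char.ofNat (48 + x.toNat) = Char.ofNat (48 + y.toNat)) : x = y := by
  interval_cases x <;> interval_cases y <;> revert h <;> decide

lemma singleton_prefix (c : Char) (l : List Char) : [c] <+: l ↔ l.head? = some c := by
  cases l with
  | nil => simp
  | cons h t => simp [List.cons_prefix_cons, eq_comm]

lemma rfind_go_spec (cs : List Char) (c : Char) (p : Nat) (hp : p < cs.length)
    (hc : cs[p] = c) (hmax : ∀ i (hi : i < cs.length), p < i → cs[i] ≠ c) :
    ∀ j, p ≤ j → PySem.Chars.rfind.go cs [c] j = p := by
  intro j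
  induction j with
  | zero =>
    intro hj
    obtain rfl : p = 0 := Nat.le_zero.mp hj
    have hpre : [c] <+: cs := (singleton_prefix c cs).mpr
      (by rw [List.head?_eq_getElem?, List.getElem?_eq_getElem hp, hc])
    simp [PySem.Chars.rfind.go, hpre]
  | succ j ihj =>
    intro hj
    by_cases hpj : p = j + 1
    · subst hpj
      have hpre : [c] <+: cs.drop (j + 1) := (singleton_prefix _ _).mpr
        (by rw [List.head?_eq_getElem?, List.getElem?_drop, Nat.add_zero,
              List.getElem?_eq_getElem hp, hc])
      simp [PySem.Chars.rfind.go, hpre]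
    · have hpj' : p ≤ j := by omega
      have hpre : ¬ ([c] <+: cs.drop (j + 1)) := by
        rw [singleton_prefix, List.head?_eq_getElem?, List.getElem?_drop, Nat.add_zero]
        rcases Nat.lt_or_ge (j + 1) cs.length with hlt | hge
        · rw [List.getElem?_eq_getElem hlt]
          intro hcc
          exact hmax (j + 1) hlt (by omega) (Option.some.inj hcc)
        · rw [List.getElem?_eq_none hge]; simp
      have hgo : PySem.Chars.rfind.go cs [c] (j + 1) = PySem.Chars.rfind.go cs [c] j := by
        simp [PySem.Chars.rfind.go, hpre]
      rw [hgo]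
      exact ihj hpj'

lemma topR_eq (row : List Int) (hne : row ≠ []) (hdig : ∀ x ∈ row, 0 ≤ x ∧ x ≤ 9) :
    (PySem.Chars.rfind (PySem.Chars.join [] (row.map PySem.Int.toChars))
      (PySem.Int.toChars (pyMaxI row))).toNat
    = row.length - 1 - pyIndexNat row.reverse (pyMaxI row) := by
  have hm : pyMaxI row ∈ row := pyMaxI_mem row hne
  rcases hdig _ hm with ⟨hm0, hm9⟩
  have hmap : row.map PySem.Int.toChars
      = (row.map (fun x => Char.ofNat (48 + x.toNat))).map (fun c => [c]) := by
    rw [List.map_map]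
    apply List.map_congr_left
    intro x hx
    rcases hdig x hx with ⟨h0, h9⟩
    exact toChars_digit x h0 h9
  rw [hmap, PySem.Chars.join_nil_singletons, toChars_digit _ hm0 hm9]
  rcases lastIdx_spec row (pyMaxI row) hm with ⟨hRlt, hRv, hRmax⟩
  have hlenm : (row.map (fun x => Char.ofNat (48 + x.toNat))).length = row.length := by simp
  have hp : row.length - 1 - pyIndexNat row.reverse (pyMaxI row)
      < (row.map (fun x => Char.ofNat (48 + x.toNat))).length := by rw [hlenm]; exact hRlt
  have hgo : PySem.Chars.rfind.go (row.map (fun x => Char.ofNat (48 + x.toNat)))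
      [Char.ofNat (48 + (pyMaxI row).toNat)]
      (row.map (fun x => Char.ofNat (48 + x.toNat))).length
      = ((row.length - 1 - pyIndexNat row.reverse (pyMaxI row) : Nat) : Int) := by
    refine rfind_go_spec _ _ _ hp ?_ ?_ _ (Nat.le_of_lt hp)
    · rw [List.getElem_map]
      exact congrArg (fun z : Int => Char.ofNat (48 + z.toNat)) hRv
    · intro i hi hpi
      rw [List.getElem_map]
      intro hcc
      have hirow : i < row.length := by rw [hlenm] at hi; exact hi
      have hdi := hdig _ (List.getElem_mem hirow)
      exact hRmax i hirow hpi (dchar_inj _ _ hdi.1 hdi.2 hm0 hm9 hcc)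
  rw [show PySem.Chars.rfind (row.map (fun x => Char.ofNat (48 + x.toNat)))
        [Char.ofNat (48 + (pyMaxI row).toNat)]
      = PySem.Chars.rfind.go (row.map (fun x => Char.ofNat (48 + x.toNat)))
        [Char.ofNat (48 + (pyMaxI row).toNat)]
        (row.map (fun x => Char.ofNat (48 + x.toNat))).length from rfl]
  rw [hgo, Int.toNat_natCast]

lemma loopR (row : List Int) (rest : List (Int × Int)) :
    ∀ (done full : List Int) (mr : List Int),
    full = done ++ rest.map (·.2) →
    (∀ q ∈ rest, q.2 = PySem.List.pyGetD row q.1 0) →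
    (rest.foldl (fun st q =>
        (if (full.take st.2).filter (fun x => decide (q.2 ≤ x)) ≠ [] then st.1.set q.1.toNat 0
         else st.1, st.2 + 1)) (mr, done.length)).1
    = ((rest.map (·.1)).foldl (pvVisStep row) (mr, pvBestOf done)).1 := by
  induction rest with
  | nil => intro _ _ _ _ _; rfl
  | cons q t ih =>
    intro done full mr hfull hval
    have htake : full.take done.length = done := by
      rw [hfull, List.take_left]
    have hq : q.2 = PySem.List.pyGetD row q.1 0 := hval q (List.mem_cons_self)
    have hstep :
        (if (full.take done.length).filter (fun x => decide (q.2 ≤ x)) ≠ [] then mr.set q.1.toNat 0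
         else mr)
        = (pvVisStep row (mr, pvBestOf done) q.1).1 := by
      rw [htake]
      rcases hb : pvBestOf done with _ | b
      · have hcnd : ¬ (done.filter (fun x => decide (q.2 ≤ x)) ≠ []) := by
          rw [cond_iff_bestOf]
          rintro ⟨b, hb', _⟩; rw [hb] at hb'; simp at hb'
        rw [if_neg hcnd]
        simp [pvVisStep, ← hq]
      · by_cases hle : q.2 ≤ b
        · have hcnd : done.filter (fun x => decide (q.2 ≤ x)) ≠ [] :=
            (cond_iff_bestOf _ _).mpr ⟨b, hb, hle⟩
          rw [if_pos hcnd]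
          simp [pvVisStep, ← hq, hle]
        · have hcnd : ¬ (done.filter (fun x => decide (q.2 ≤ x)) ≠ []) := by
            rw [cond_iff_bestOf]
            rintro ⟨b', hb', hle'⟩; rw [hb] at hb'
            obtain rfl : b = b' := by injection hb'
            exact hle hle'
          rw [if_neg hcnd]
          simp [pvVisStep, ← hq, hle]
    have hsnd : (pvVisStep row (mr, pvBestOf done) q.1).2 = pvBestOf (done ++ [q.2]) := by
      rw [pvBestOf_append_singleton]
      simp [pvVisStep, ← hq]
    simp only [List.foldl_cons, List.map_cons]
    have hfold1 : (if (full.take done.length).filter (fun x => decide (q.2 ≤ x)) ≠ [] then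
          mr.set q.1.toNat 0 else mr, done.length + 1)
        = ((pvVisStep row (mr, pvBestOf done) q.1).1, (done ++ [q.2]).length) := by
      rw [hstep]; simp
    rw [hfold1, ih (done ++ [q.2]) full _ (by rw [hfull]; simp) (fun p hp => hval p (List.mem_cons_of_mem _ hp))]
    have hpr : ((pvVisStep row (mr, pvBestOf done) q.1).1, pvBestOf (done ++ [q.2]))
        = pvVisStep row (mr, pvBestOf done) q.1 := by
      rw [← hsnd]
    rw [hpr]

lemma rowR_eq (row mrow : List Int) (hne : row ≠ []) (hdig : ∀ x ∈ row, 0 ≤ x ∧ x ≤ 9) :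
    rowA_r row mrow = markFromRight row mrow := by
  have hm : pyMaxI row ∈ row := pyMaxI_mem row hne
  have hpos : 0 < row.length := List.length_pos_of_mem hm
  rcases lastIdx_spec row (pyMaxI row) hm with ⟨hRlt, _, _⟩
  simp only [rowA_r, markFromRight]
  rw [topR_eq row hne hdig]
  set R := row.length - 1 - pyIndexNat row.reverse (pyMaxI row) with hRdef
  set L := pyIndexNat row (pyMaxI row) with hLdef
  have hLle : L ≤ row.length := pyIndexNat_le row _
  clear_value R L
  have hb0 : (0 : Int) ≤ (row.length : Int) - 1 - (R : Int) := by omega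
  have hbn : ((row.length : Int) - 1 - (R : Int)).toNat = row.length - 1 - R := by omega
  rw [PySem.List.slice_to _ hb0, PySem.List.slice_to _ hb0, hbn]
  have hrtl : ((PySem.List.enumerate row).reverse.take (row.length - 1 - R)).map (·.2)
      = row.reverse.take (row.length - 1 - R) := by
    rw [List.map_take, List.map_reverse, PySem.List.map_snd_enumerate]
  have hsplit : PySem.List.pyRange 0 (row.length : Int) 1
      = PySem.List.pyRange 0 ((R : Int) + 1) 1
        ++ PySem.List.pyRange ((R : Int) + 1) (row.length : Int) 1 :=
    PySem.List.pyRange_one_append _ _ _ (by omega) (by omega)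
  have hlen2 : (PySem.List.pyRange ((R : Int) + 1) (row.length : Int) 1).length
      = row.length - 1 - R := by
    rw [PySem.List.length_pyRange_one]; omega
  have hfst : ((PySem.List.enumerate row).reverse.take (row.length - 1 - R)).map (·.1)
      = PySem.List.pyRange ((row.length : Int) - 1) (R : Int) (-1) := by
    rw [PySem.List.pyRange_neg_one_eq_reverse,
      show (row.length : Int) - 1 + 1 = (row.length : Int) by ring]
    rw [List.map_take, List.map_reverse, PySem.List.map_fst_enumerate, zero_add, hsplit,
      List.reverse_append]
    rw [List.take_left' (by rw [List.length_reverse, hlen2])]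
  have hval : ∀ q ∈ (PySem.List.enumerate row).reverse.take (row.length - 1 - R),
      q.2 = PySem.List.pyGetD row q.1 0 := by
    intro q hq
    have hq2 : q ∈ PySem.List.enumerate row :=
      (List.mem_reverse).mp (List.mem_of_mem_take hq)
    rcases (PySem.List.mem_enumerate_iff _ _ _).mp hq2 with ⟨k, hk, rfl⟩
    show row[k] = PySem.List.pyGetD row (0 + (k : Int)) 0
    rw [zero_add, PySem.List.pyGetD_natCast, List.getD_eq_getElem _ _ hk]
  have hloop := loopR row ((PySem.List.enumerate row).reverse.take (row.length - 1 - R))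
      [] (row.reverse.take (row.length - 1 - R)) (mrow.set R 1) (by rw [List.nil_append]; exact hrtl.symm) hval
  simp only [List.length_nil] at hloop
  rw [hloop, hfst, show (pvBestOf [] : Option Int) = none from rfl]
  have hhid : (PySem.List.slice row (some ((L : Int) + 1)) (some (R : Int))).length
      = R - (L + 1) := by
    rw [show (L : Int) + 1 = ((L + 1 : Nat) : Int) by push_cast; ring]
    rw [PySem.List.length_slice, PySem.List.clampIdx_natCast, PySem.List.clampIdx_natCast]
    omega
  rw [hhid]
  by_cases hc : L + 1 < R
  · rw [if_pos (by omega), if_pos hc, Nat.sub_sub]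
  · rw [if_neg (by omega), if_neg hc]

-- ===== lifting a row transform through the marks matrix =====

lemma set_getD_self (mk : List (List Int)) (i : Nat) : mk.set i (mk.getD i []) = mk := by
  rcases Nat.lt_or_ge i mk.length with h | h
  · apply List.ext_getElem (by simp)
    intro j h1 h2
    rw [List.getElem_set]
    by_cases hij : i = j
    · subst hij; rw [if_pos rfl, List.getD_eq_getElem _ _ h]
    · rw [if_neg hij]
  · rw [List.set_eq_of_length_le h]

lemma set_getD_out (mk : List (List Int)) (i : Nat) (r : List Int) (h : mk.length ≤ i) :
    (mk.set i r).getD i [] = [] := by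
  rw [List.set_eq_of_length_le h]
  simp [List.getD_eq_getElem?_getD, List.getElem?_eq_none h]

lemma getD_out (mk : List (List Int)) (i : Nat) (h : mk.length ≤ i) : mk.getD i [] = [] := by
  simp [List.getD_eq_getElem?_getD, List.getElem?_eq_none h]

lemma getD_set_self (mk : List (List Int)) (i : Nat) (r : List Int) (h : i < mk.length) :
    (mk.set i r).getD i [] = r := by
  have h' : i < (mk.set i r).length := by simpa using h
  rw [List.getD_eq_getElem _ _ h', List.getElem_set, if_pos rfl]

lemma foldl_rowlift {σ : Type} (l : List σ) (idx : Nat) (F : σ → List Int → List Int)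
    (hF : ∀ q, F q [] = []) (mk : List (List Int)) :
    l.foldl (fun mk' q => mk'.set idx (F q (mk'.getD idx []))) mk
    = mk.set idx (l.foldl (fun r q => F q r) (mk.getD idx [])) := by
  induction l generalizing mk with
  | nil => exact (set_getD_self mk idx).symm
  | cons q t ih =>
    simp only [List.foldl_cons]
    rw [ih, List.set_set]
    congr 1
    rcases Nat.lt_or_ge idx mk.length with h | h
    · rw [getD_set_self _ _ _ h]
    · rw [set_getD_out _ _ _ h, getD_out _ _ h, hF]

lemma foldl_rowlift_pair {σ : Type} (l : List σ) (idx : Nat)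
    (F : σ → Nat → List Int → List Int) (hF : ∀ q c, F q c [] = []) :
    ∀ (mk : List (List Int)) (c0 : Nat),
    l.foldl (fun st q => (st.1.set idx (F q st.2 (st.1.getD idx [])), st.2 + 1)) (mk, c0)
    = (mk.set idx ((l.foldl (fun st q => (F q st.2 st.1, st.2 + 1)) (mk.getD idx [], c0)).1),
       (l.foldl (fun st q => (F q st.2 st.1, st.2 + 1)) (mk.getD idx [], c0)).2) := by
  induction l with
  | nil =>
    intro mk c0
    simp only [List.foldl_nil]
    rw [set_getD_self]
  | cons q t ih =>
    intro mk c0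
    simp only [List.foldl_cons]
    rw [ih]
    have hinner : (mk.set idx (F q c0 (mk.getD idx []))).getD idx [] = F q c0 (mk.getD idx []) := by
      rcases Nat.lt_or_ge idx mk.length with h | h
      · exact getD_set_self _ _ _ h
      · rw [set_getD_out _ _ _ h, getD_out _ _ h, hF]
    rw [hinner, List.set_set]

lemma foldl_rowlift_pair1 {σ : Type} (l : List σ) (idx : Nat)
    (F : σ → Nat → List Int → List Int) (hF : ∀ q c, F q c [] = [])
    (mk : List (List Int)) (j0 : Nat) (v : Int) :
    (l.foldl (fun st q => (st.1.set idx (F q st.2 (st.1.getD idx [])), st.2 + 1))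
      (pvSet2 mk idx j0 v, 0)).1
    = mk.set idx ((l.foldl (fun st q => (F q st.2 st.1, st.2 + 1))
        ((mk.getD idx []).set j0 v, 0)).1) := by
  rw [foldl_rowlift_pair l idx F hF (pvSet2 mk idx j0 v) 0]
  dsimp only
  rw [show pvSet2 mk idx j0 v = mk.set idx ((mk.getD idx []).set j0 v) from rfl, List.set_set]
  rcases Nat.lt_or_ge idx mk.length with h | h
  · rw [getD_set_self _ _ _ h]
  · rw [set_getD_out _ _ _ h, getD_out _ _ h]
    rfl

-- ===== the whole-fold shape =====

lemma foldl_setRange_mapIdx (F : Nat → List Int → List Int) (k : Nat) :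
    ∀ (a : Nat) (mk : List (List Int)),
    (PySem.List.pyRange (a : Int) ((a : Int) + (k : Int)) 1).foldl
        (fun mk' i => mk'.set i.toNat (F i.toNat (mk'.getD i.toNat []))) mk
    = mk.mapIdx (fun j r => if a ≤ j ∧ j < a + k then F j r else r) := by
  induction k with
  | zero =>
    intro a mk
    rw [show (a : Int) + ((0 : Nat) : Int) = (a : Int) by push_cast; ring,
      PySem.List.pyRange_one_eq_nil (le_refl _)]
    simp only [List.foldl_nil]
    symm
    apply List.ext_getElem (by simp)
    intro j hj1 hj2
    rw [List.getElem_mapIdx, if_neg (by omega)]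
  | succ k ih =>
    intro a mk
    have h1 : (a : Int) < (a : Int) + ((k + 1 : Nat) : Int) := by push_cast; omega
    rw [PySem.List.pyRange_one_cons h1]
    simp only [List.foldl_cons]
    rw [show (a : Int) + 1 = ((a + 1 : Nat) : Int) by push_cast; ring]
    rw [show (a : Int) + ((k + 1 : Nat) : Int) = ((a + 1 : Nat) : Int) + (k : Int) by push_cast; ring]
    rw [ih (a + 1)]
    simp only [Int.toNat_natCast]
    apply List.ext_getElem (by simp)
    intro j hj1 hj2
    have hj2' : j < mk.length := by simpa using hj2
    simp only [List.getElem_mapIdx]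
    by_cases haj : a = j
    · subst haj
      have hal : a < mk.length := hj2'
      rw [if_neg (by omega), if_pos (by omega), List.getElem_set, if_pos rfl,
        List.getD_eq_getElem _ _ hal]
    · have hset : (mk.set a (F a (mk.getD a [])))[j]'(by simpa using hj2') = mk[j]'hj2' := by
        rw [List.getElem_set, if_neg haj]
      rw [hset]
      by_cases hcond : a + 1 ≤ j ∧ j < a + 1 + k
      · rw [if_pos hcond, if_pos (by omega)]
      · rw [if_neg hcond, if_neg (by omega)]

lemma foldB_core (heights marks : List (List Int))
    (body : List (List Int) → Int → List (List Int)) (G : List Int → List Int → List Int)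
    (hmid : ∀ mk (j : Int), 1 ≤ j → j < (heights.length : Int) - 1 →
        body mk j = mk.set j.toNat (G (heights.getD j.toNat []) (mk.getD j.toNat []))) :
    (PySem.List.pyRange 1 ((heights.length : Int) - 1) 1).foldl body marks
    = pvApply heights G marks := by
  rcases Nat.lt_or_ge heights.length 2 with h2 | h2
  · rw [PySem.List.pyRange_one_eq_nil (by omega)]
    simp only [List.foldl_nil]
    symm
    unfold pvApply
    apply List.ext_getElem (by simp)
    intro j hj1 hj2
    rw [List.getElem_mapIdx, if_neg (by omega)]
  · have hcg : ∀ (acc : List (List Int)), ∀ j ∈ PySem.List.pyRange 1 ((heights.length : Int) - 1) 1,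
        body acc j = acc.set j.toNat (G (heights.getD j.toNat []) (acc.getD j.toNat [])) := by
      intro acc j hj
      have hj' := (PySem.List.mem_pyRange_one).mp hj
      exact hmid acc j hj'.1 hj'.2
    rw [PySem.List.foldl_congr_mem _ _
      (fun mk j => mk.set j.toNat (G (heights.getD j.toNat []) (mk.getD j.toNat []))) marks hcg]
    have H := foldl_setRange_mapIdx (fun j r => G (heights.getD j []) r) (heights.length - 2) 1 marks
    simp only [Nat.cast_one] at H
    rw [show (1 : Int) + ((heights.length - 2 : Nat) : Int) = (heights.length : Int) - 1 by
      omega] at H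
    refine H.trans ?_
    unfold pvApply
    apply List.ext_getElem (by simp)
    intro j hj1 hj2
    simp only [List.getElem_mapIdx]
    by_cases hcnd : 1 ≤ j ∧ j < 1 + (heights.length - 2)
    · rw [if_pos hcnd, if_pos (by omega)]
    · rw [if_neg hcnd, if_neg (by omega)]

lemma foldA_core (heights marks : List (List Int))
    (body : List (List Int) → (Int × List Int) → List (List Int))
    (G : List Int → List Int → List Int)
    (hskip : ∀ mk (p : Int × List Int), (p.1 = 0 ∨ p.1 = (heights.length : Int) - 1) →
        body mk p = mk)
    (hmid : ∀ mk (j : Int), 1 ≤ j → j < (heights.length : Int) - 1 →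
        body mk (j, PySem.List.pyGetD heights j [])
        = mk.set j.toNat (G (heights.getD j.toNat []) (mk.getD j.toNat []))) :
    (PySem.List.enumerate heights).foldl body marks = pvApply heights G marks := by
  rw [PySem.List.enumerate_eq_map_pyRange heights [], List.foldl_map, PySem.List.len_eq]
  have hsing : PySem.List.pyRange (0 : Int) 1 1 = [0] := by
    have h := PySem.List.pyRange_one_singleton (0 : Int)
    norm_num at h
    exact h
  rcases Nat.lt_or_ge heights.length 2 with h2 | h2
  · have hfold : (PySem.List.pyRange 0 (heights.length : Int) 1).foldl
        (fun mk j => body mk (j, PySem.List.pyGetD heights j [])) marks = marks := by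
      rcases (by omega : heights.length = 0 ∨ heights.length = 1) with h | h <;> rw [h]
      · rw [show ((0 : Nat) : Int) = (0 : Int) by norm_num,
          PySem.List.pyRange_one_eq_nil (le_refl _)]
        rfl
      · rw [show ((1 : Nat) : Int) = (1 : Int) by norm_num, hsing]
        simp only [List.foldl_cons, List.foldl_nil]
        exact hskip marks _ (Or.inl rfl)
    rw [hfold]
    symm
    unfold pvApply
    apply List.ext_getElem (by simp)
    intro j hj1 hj2
    rw [List.getElem_mapIdx, if_neg (by omega)]
  · have hlast : PySem.List.pyRange ((heights.length : Int) - 1) (heights.length : Int) 1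
        = [(heights.length : Int) - 1] := by
      have h := PySem.List.pyRange_one_singleton ((heights.length : Int) - 1)
      rw [show (heights.length : Int) - 1 + 1 = (heights.length : Int) by ring] at h
      exact h
    rw [PySem.List.pyRange_one_append 0 ((heights.length : Int) - 1) (heights.length : Int)
      (by omega) (by omega)]
    rw [List.foldl_append]
    rw [PySem.List.pyRange_one_append 0 1 ((heights.length : Int) - 1) (by omega) (by omega)]
    rw [List.foldl_append, hsing, hlast]
    simp only [List.foldl_cons, List.foldl_nil]
    rw [hskip marks _ (Or.inl rfl)]
    rw [hskip _ _ (Or.inr rfl)]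
    exact foldB_core heights marks _ G (fun mk j h1 hj => hmid mk j h1 hj)

-- per-side characterizations of the two ports

lemma look_else (heights marks : List (List Int)) (side : String)
    (hl : side ≠ "l") (hr : side ≠ "r") : look heights marks side = marks := by
  unfold look
  rw [PySem.List.foldl_congr_mem _ _ (fun mk _ => mk) marks ?_]
  · exact PySem.List.foldl_ignore _ _
  · intro acc p _
    simp only [if_neg hl, if_neg hr, ite_self]

lemma look_alt_else (heights marks : List (List Int)) (side : String)
    (hl : side ≠ "l") (hr : side ≠ "r") : look_alt heights marks side = marks := by
  unfold look_alt
  rw [PySem.List.foldl_congr_mem _ _ (fun mk _ => mk) marks ?_]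
  · exact PySem.List.foldl_ignore _ _
  · intro acc p _
    simp only [if_neg hl, if_neg hr]

lemma look_alt_l (heights marks : List (List Int)) :
    look_alt heights marks "l" = pvApply heights markFromLeft marks := by
  unfold look_alt
  rw [PySem.List.len_eq]
  exact foldB_core heights marks _ markFromLeft (fun mk j h1 h2 => by rw [if_pos rfl])

lemma look_alt_r (heights marks : List (List Int)) :
    look_alt heights marks "r" = pvApply heights markFromRight marks := by
  unfold look_alt
  rw [PySem.List.len_eq]
  exact foldB_core heights marks _ markFromRight
    (fun mk j h1 h2 => by rw [if_neg (by decide), if_pos rfl])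

lemma ite_set_nil (c : Prop) [Decidable c] (i : Nat) (v : Int) :
    (if c then ([] : List Int).set i v else []) = [] := by
  split <;> rfl

lemma step_eq_l (row : List Int) (idx : Nat) (acc : List (List Int)) (q : Int × Int) :
    (if (row.take q.1.toNat).filter (fun x => decide (q.2 ≤ x)) ≠ [] then
      pvSet2 acc idx q.1.toNat 0 else acc)
    = acc.set idx (if (row.take q.1.toNat).filter (fun x => decide (q.2 ≤ x)) ≠ [] then
        (acc.getD idx []).set q.1.toNat 0 else acc.getD idx []) := by
  by_cases hcnd : (row.take q.1.toNat).filter (fun x => decide (q.2 ≤ x)) ≠ []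
  · rw [if_pos hcnd, if_pos hcnd]; rfl
  · rw [if_neg hcnd, if_neg hcnd, set_getD_self]

lemma step_eq_r (rtl : List Int) (idx : Nat) (acc : List (List Int) × Nat) (q : Int × Int) :
    ((if (rtl.take acc.2).filter (fun x => decide (q.2 ≤ x)) ≠ [] then
        pvSet2 acc.1 idx q.1.toNat 0 else acc.1), acc.2 + 1)
    = (acc.1.set idx (if (rtl.take acc.2).filter (fun x => decide (q.2 ≤ x)) ≠ [] then
        (acc.1.getD idx []).set q.1.toNat 0 else acc.1.getD idx []), acc.2 + 1) := by
  by_cases hcnd : (rtl.take acc.2).filter (fun x => decide (q.2 ≤ x)) ≠ []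
  · rw [if_pos hcnd, if_pos hcnd]; rfl
  · rw [if_neg hcnd, if_neg hcnd, set_getD_self]

lemma look_l (heights marks : List (List Int)) :
    look heights marks "l" = pvApply heights rowA_l marks := by
  unfold look
  refine foldA_core heights marks _ rowA_l ?_ ?_
  · intro mk p hp
    simp only [PySem.List.len_eq]
    rw [if_pos hp]
  · intro mk j h1 h2
    simp only [PySem.List.len_eq, if_true]
    rw [if_neg (show ¬(j = 0 ∨ j = (heights.length : Int) - 1) by omega)]
    have hrow : PySem.List.pyGetD heights j [] = heights.getD j.toNat [] := by
      rw [show j = ((j.toNat : Nat) : Int) by omega, PySem.List.pyGetD_natCast, Int.toNat_natCast]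
    rw [hrow]
    set row := heights.getD j.toNat [] with hrowdef
    set idx := j.toNat with hidxdef
    rw [PySem.List.foldl_congr_mem
      (PySem.List.enumerate (row.take (pyIndexNat row (pyMaxI row))))
      (fun (mk'' : List (List Int)) (q : Int × Int) =>
        if (row.take q.1.toNat).filter (fun x => decide (q.2 ≤ x)) ≠ [] then
          pvSet2 mk'' idx q.1.toNat 0 else mk'')
      (fun (mk'' : List (List Int)) (q : Int × Int) =>
        mk''.set idx (if (row.take q.1.toNat).filter (fun x => decide (q.2 ≤ x)) ≠ [] then
          (mk''.getD idx []).set q.1.toNat 0 else mk''.getD idx []))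
      (pvSet2 mk idx (pyIndexNat row (pyMaxI row)) 1)
      (fun acc q _ => step_eq_l row idx acc q)]
    refine (foldl_rowlift (PySem.List.enumerate (row.take (pyIndexNat row (pyMaxI row)))) idx
      (fun (q : Int × Int) (r : List Int) =>
        if (row.take q.1.toNat).filter (fun x => decide (q.2 ≤ x)) ≠ [] then
          r.set q.1.toNat 0 else r)
      (fun q => ite_set_nil _ _ _)
      (pvSet2 mk idx (pyIndexNat row (pyMaxI row)) 1)).trans ?_
    rw [show pvSet2 mk idx (pyIndexNat row (pyMaxI row)) 1
        = mk.set idx ((mk.getD idx []).set (pyIndexNat row (pyMaxI row)) 1) from rfl,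
      List.set_set]
    congr 1
    rcases Nat.lt_or_ge idx mk.length with h | h
    · rw [getD_set_self _ _ _ h]
      rfl
    · rw [set_getD_out _ _ _ h, getD_out _ _ h]
      rfl

lemma look_r (heights marks : List (List Int)) :
    look heights marks "r" = pvApply heights rowA_r marks := by
  unfold look
  refine foldA_core heights marks _ rowA_r ?_ ?_
  · intro mk p hp
    simp only [PySem.List.len_eq]
    rw [if_pos hp]
  · intro mk j h1 h2
    simp only [PySem.List.len_eq, if_true]
    rw [if_neg (show ¬(j = 0 ∨ j = (heights.length : Int) - 1) by omega)]
    rw [if_neg (show ¬(("r" : String) = "l") by decide)]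
    have hrow : PySem.List.pyGetD heights j [] = heights.getD j.toNat [] := by
      rw [show j = ((j.toNat : Nat) : Int) by omega, PySem.List.pyGetD_natCast, Int.toNat_natCast]
    rw [hrow]
    simp only [rowA_r]
    set row := heights.getD j.toNat [] with hrowdef
    set idx := j.toNat with hidxdef
    set topR := (PySem.Chars.rfind (PySem.Chars.join [] (row.map PySem.Int.toChars))
      (PySem.Int.toChars (pyMaxI row))).toNat with htopRdef
    set rtl := PySem.List.slice row.reverse none (some ((row.length : Int) - 1 - (topR : Int)))
      with hrtldef
    set rte := PySem.List.slice (PySem.List.enumerate row).reverse none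
      (some ((row.length : Int) - 1 - (topR : Int))) with hrtedef
    rw [PySem.List.foldl_congr_mem rte
      (fun (st : List (List Int) × Nat) (q : Int × Int) =>
        (if (rtl.take st.2).filter (fun x => decide (q.2 ≤ x)) ≠ [] then
           pvSet2 st.1 idx q.1.toNat 0 else st.1, st.2 + 1))
      (fun (st : List (List Int) × Nat) (q : Int × Int) =>
        (st.1.set idx (if (rtl.take st.2).filter (fun x => decide (q.2 ≤ x)) ≠ [] then
          (st.1.getD idx []).set q.1.toNat 0 else st.1.getD idx []), st.2 + 1))
      (pvSet2 mk idx topR 1, (0 : Nat))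
      (fun acc q _ => step_eq_r rtl idx acc q)]
    rw [foldl_rowlift_pair1 rte idx
      (fun (q : Int × Int) (c : Nat) (r : List Int) =>
        if (rtl.take c).filter (fun x => decide (q.2 ≤ x)) ≠ [] then r.set q.1.toNat 0 else r)
      (fun q c => ite_set_nil _ _ _)
      mk topR 1]
    rcases Nat.lt_or_ge idx mk.length with h | h
    · by_cases hhid : 0 < (PySem.List.slice row (some ((pyIndexNat row (pyMaxI row) : Int) + 1))
          (some (topR : Int))).length
      · simp only [if_pos hhid]
        rw [getD_set_self _ _ _ h, List.set_set]
      · simp only [if_neg hhid]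
    · simp only [List.set_eq_of_length_le h, ite_self]

lemma pvApply_congr (heights marks : List (List Int)) (G G' : List Int → List Int → List Int)
    (h : ∀ j : Nat, 1 ≤ j → j + 1 < heights.length → j < marks.length →
      G (heights.getD j []) (marks.getD j []) = G' (heights.getD j []) (marks.getD j [])) :
    pvApply heights G marks = pvApply heights G' marks := by
  unfold pvApply
  apply List.ext_getElem (by simp)
  intro j hj1 hj2
  have hj1' : j < marks.length := by simpa using hj1
  simp only [List.getElem_mapIdx]
  by_cases hc : 1 ≤ j ∧ j + 1 < heights.length
  · rw [if_pos hc, if_pos hc]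
    have hr : marks[j] = marks.getD j [] := (List.getD_eq_getElem _ _ hj1').symm
    rw [hr]
    exact h j hc.1 hc.2 hj1'
  · rw [if_neg hc, if_neg hc]

-- ===== VERDICT (by name: the statement is the Claim_ definition above) =====
theorem look_spec : Claim_equal_look := by
  intro heights marks side hdom hpre
  unfold Spec_look
  by_cases hl : side = "l"
  · subst hl
    rw [look_l, look_alt_l]
    exact pvApply_congr _ _ _ _ (fun j _ _ _ => rowL_eq _ _)
  · by_cases hr : side = "r"
    · subst hr
      rw [look_r, look_alt_r]
      apply pvApply_congr
      intro j h1 h2 h3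
      have hjlen : j < heights.length := by omega
      have hmem : heights.getD j [] ∈ heights := by
        rw [List.getD_eq_getElem _ _ hjlen]
        exact List.getElem_mem _
      exact rowR_eq _ _ (hpre.1 _ hmem) (hpre.2.2 rfl j hjlen h1 h2)
    · rw [look_else _ _ _ hl hr, look_alt_else _ _ _ hl hr]
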